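-- pv_equiv track=rewrite | github.com/Nama21yo/NatnaelHackerrank | premium_questions/sliding_window/diet_plan_performance_1176.py | diet_plan
-- ===== SOURCE A (Python) =====
-- def diet_plan(calories, k, lower, upper):
--     l = 0
--     n = len(calories)
--     current_calorie = 0
--     point = 0
--
--     for r in range(n):
--         current_calorie += calories[r]
--         if r - l + 1 > k:
--             current_calorie -= calories[l]
--             l += 1
--         if r - l + 1 == k:
--             if current_calorie < lower:
--                 point -= 1
--             elif current_calorie > upper:
--                 point += 1
--     return point
-- ===== SOURCE B (Python) =====
-- def diet_plan(calories, k, lower, upper):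
--     n = len(calories)
--     if k <= 0:
--         return 0  # no window of positive length exists
--     pre = [0]
--     for c in calories:
--         pre.append(pre[-1] + c)
--     point = 0
--     for i in range(n - k + 1):
--         w = pre[i + k] - pre[i]
--         if w < lower:
--             point -= 1
--         elif w > upper:
--             point += 1
--     return point
-- ===== Notes on version B (the rewrite author's own statement) =====
-- stated objective: alternative
-- what changed: Replaced the stateful sliding-window loop (left pointer + running sum maintained per step) with a prefix-sum array and a direct loop over window starts computing each window as pre[i+k]-pre[i]; non-positive k naturally yields no windows and 0 points.
-- intended difference: For k=0 with nonempty calories and lower>0 (or upper<0), A's degenerate sliding loop scores n empty zero-calorie windows and returns -n (resp. n), while B returns 0 because no window of positive length exists, which is the intended value. — e.g. on diet_plan([1], 0, 1, 5): A returns -1, B returns 0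
import Mathlib
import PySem

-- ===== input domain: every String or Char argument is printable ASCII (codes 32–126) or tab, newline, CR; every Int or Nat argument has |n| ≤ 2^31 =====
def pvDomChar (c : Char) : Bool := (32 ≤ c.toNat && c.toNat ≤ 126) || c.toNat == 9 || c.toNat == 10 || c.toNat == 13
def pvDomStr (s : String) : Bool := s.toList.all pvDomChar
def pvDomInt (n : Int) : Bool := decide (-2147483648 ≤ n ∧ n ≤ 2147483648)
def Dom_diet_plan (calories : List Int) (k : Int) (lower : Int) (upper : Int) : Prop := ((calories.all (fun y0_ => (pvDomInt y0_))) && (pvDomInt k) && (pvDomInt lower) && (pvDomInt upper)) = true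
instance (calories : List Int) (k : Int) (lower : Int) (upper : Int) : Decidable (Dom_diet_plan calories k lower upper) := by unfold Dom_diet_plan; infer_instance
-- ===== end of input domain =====

-- B replaces A's stateful sliding window (left pointer + running calorie sum) by a
-- prefix-sum list and one loop over window starts (alternative decomposition, same cost);
-- for k = 0 B returns 0 (no positive-length window) where A scores n empty windows — see D_.

-- ===== PORT A =====
-- A's loop body as a helper (indices r from range(n) and l with 0 ≤ l ≤ r are always
-- in range, so pyGetD with default 0 is exact here)
def stepA (xs : List Int) (k lower upper : Int) (st : Int × Int × Int) (r : Int) : Int × Int × Int :=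
  let l := st.1
  let cur := st.2.1 + PySem.List.pyGetD xs r 0
  let p := if r - l + 1 > k then (cur - PySem.List.pyGetD xs l 0, l + 1) else (cur, l)
  let point :=
    if r - p.2 + 1 = k then
      (if p.1 < lower then st.2.2 - 1 else if p.1 > upper then st.2.2 + 1 else st.2.2)
    else st.2.2
  (p.2, p.1, point)

def diet_plan (calories : List Int) (k : Int) (lower : Int) (upper : Int) : Int :=
  let n : Int := calories.length
  ((PySem.List.pyRange 0 n 1).foldl (stepA calories k lower upper) (0, 0, 0)).2.2

-- ===== PORT B =====
-- Source B's prefix-sum building loop (`pre = [0]; for c in calories: pre.append(pre[-1] + c)`)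
def pyPrefix (calories : List Int) : List Int :=
  calories.foldl (fun acc c => acc ++ [PySem.List.pyGetD acc (-1) 0 + c]) [(0:Int)]

def diet_plan_alt (calories : List Int) (k : Int) (lower : Int) (upper : Int) : Int :=
  let n : Int := calories.length
  if k ≤ 0 then 0
  else
    let pre := pyPrefix calories
    (PySem.List.pyRange 0 (n - k + 1) 1).foldl (fun point i =>
      let w := PySem.List.pyGetD pre (i + k) 0 - PySem.List.pyGetD pre i 0
      if w < lower then point - 1 else if w > upper then point + 1 else point) 0

-- ===== PRECONDITION & SPEC =====
-- For k=0 with nonempty calories and lower>0 (or upper<0), A's degenerate sliding loop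
-- scores n empty zero-calorie windows and returns -n (resp. n), while B returns 0 because
-- no window of positive length exists, which is the intended value.
def D_diet_plan (calories : List Int) (k : Int) (lower : Int) (upper : Int) : Prop :=
  k = 0 ∧ calories ≠ [] ∧ (0 < lower ∨ upper < 0)
instance (calories : List Int) (k : Int) (lower : Int) (upper : Int) : Decidable (D_diet_plan calories k lower upper) := by unfold D_diet_plan; infer_instance

def Spec_diet_plan (calories : List Int) (k : Int) (lower : Int) (upper : Int) (out : Int) : Prop := ¬ D_diet_plan calories k lower upper → out = diet_plan_alt calories k lower upper
instance (calories : List Int) (k : Int) (lower : Int) (upper : Int) (out : Int) : Decidable (Spec_diet_plan calories k lower upper out) := by unfold Spec_diet_plan; infer_instance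

def pvDiffWitness_diet_plan : List Int × Int × Int × Int := ([1], 0, 1, 5)
def pvDiffWitnessOut_diet_plan : Int × Int := (-1, 0)

-- ===== CLAIM (what is proved, stated in full; the proofs are below) =====
def Claim_unchanged_diet_plan : Prop := ∀ (calories : List Int) (k : Int) (lower : Int) (upper : Int), Dom_diet_plan calories k lower upper → Spec_diet_plan calories k lower upper (diet_plan calories k lower upper)
def Claim_changed_diet_plan : Prop := Dom_diet_plan (pvDiffWitness_diet_plan.1) (pvDiffWitness_diet_plan.2.1) (pvDiffWitness_diet_plan.2.2.1) (pvDiffWitness_diet_plan.2.2.2) ∧ D_diet_plan (pvDiffWitness_diet_plan.1) (pvDiffWitness_diet_plan.2.1) (pvDiffWitness_diet_plan.2.2.1) (pvDiffWitness_diet_plan.2.2.2) ∧ diet_plan (pvDiffWitness_diet_plan.1) (pvDiffWitness_diet_plan.2.1) (pvDiffWitness_diet_plan.2.2.1) (pvDiffWitness_diet_plan.2.2.2) = pvDiffWitnessOut_diet_plan.1 ∧ diet_plan_alt (pvDiffWitness_diet_plan.1) (pvDiffWitness_diet_plan.2.1) (pvDiffWitness_diet_plan.2.2.1) (pvDiffWitness_diet_plan.2.2.2)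 = pvDiffWitnessOut_diet_plan.2 ∧ pvDiffWitnessOut_diet_plan.1 ≠ pvDiffWitnessOut_diet_plan.2
def Claim_exact_diet_plan : Prop := ∀ (calories : List Int) (k : Int) (lower : Int) (upper : Int), Dom_diet_plan calories k lower upper → D_diet_plan calories k lower upper → diet_plan calories k lower upper ≠ diet_plan_alt calories k lower upper

-- ===== LEMMAS AND PROOFS =====

-- sum of the first t elements
def S (xs : List Int) (t : Nat) : Int := (xs.take t).sum

-- window size after iteration j of A's loop
def mA (k : Int) (j : Nat) : Int := max 0 (min (j:Int) k)

-- scoring step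
def sc (lower upper p w : Int) : Int :=
  if w < lower then p - 1 else if w > upper then p + 1 else p

-- A's point counter after j iterations, in closed form
def PA (xs : List Int) (k lower upper : Int) : Nat → Int
  | 0 => 0
  | j+1 =>
      let p := PA xs k lower upper j
      if mA k (j+1) = k then
        sc lower upper p (S xs (j+1) - S xs (((j:Int) + 1 - k).toNat))
      else p

theorem S_succ (xs : List Int) (t : Nat) (h : t < xs.length) :
    S xs (t+1) = S xs t + xs.getD t 0 := by
  rw [S, S, List.sum_take_succ _ _ h, List.getD_eq_getElem _ _ h]

theorem mA_nonneg (k : Int) (j : Nat) : 0 ≤ mA k j := le_max_left _ _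

theorem mA_le (k : Int) (j : Nat) : mA k j ≤ (j:Int) := by
  unfold mA; omega

theorem pyGetD_toNat (xs : List Int) (i : Int) (h0 : 0 ≤ i) (h1 : i < xs.length) :
    PySem.List.pyGetD xs i 0 = xs.getD i.toNat 0 := by
  rw [PySem.List.pyGetD_eq_getElem xs 0 h0 h1, List.getD_eq_getElem _ _ (by omega)]

theorem stepA_closed (xs : List Int) (k lower upper : Int) (j : Nat) (p : Int)
    (hjl : j < xs.length) :
    stepA xs k lower upper
      ((j:Int) - mA k j, S xs j - S xs (((j:Int) - mA k j).toNat), p) (j:Int) =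
      ((j:Int) + 1 - mA k (j+1),
       S xs (j+1) - S xs (((j:Int) + 1 - mA k (j+1)).toNat),
       if mA k (j+1) = k then
         sc lower upper p (S xs (j+1) - S xs (((j:Int) + 1 - k).toNat))
       else p) := by
  have hn : (j:Int) < (xs.length : Int) := by exact_mod_cast hjl
  have ha0 := mA_nonneg k j
  have haj := mA_le k j
  have hb0 := mA_nonneg k (j+1)
  have hgj : PySem.List.pyGetD xs (j:Int) 0 = xs.getD j 0 := by
    rw [pyGetD_toNat xs _ (by omega) hn]; simp
  have hSj : S xs (j+1) = S xs j + xs.getD j 0 := S_succ xs j hjl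
  by_cases hck : (j:Int) - ((j:Int) - mA k j) + 1 > k
  · -- shrink branch
    have hb : mA k (j+1) = mA k j := by unfold mA at *; push_cast at *; omega
    have hgl : PySem.List.pyGetD xs ((j:Int) - mA k j) 0 =
        xs.getD ((j:Int) - mA k j).toNat 0 := pyGetD_toNat xs _ (by omega) (by omega)
    have ht : (((j:Int) + 1 - mA k (j+1)).toNat) = (((j:Int) - mA k j).toNat) + 1 := by
      rw [hb]; omega
    have hSl : S xs ((((j:Int) - mA k j).toNat) + 1) =
        S xs (((j:Int) - mA k j).toNat) + xs.getD (((j:Int) - mA k j).toNat) 0 :=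
      S_succ xs _ (by omega)
    have hcur : S xs j - S xs (((j:Int) - mA k j).toNat) + PySem.List.pyGetD xs (j:Int) 0
        - PySem.List.pyGetD xs ((j:Int) - mA k j) 0 =
        S xs (j+1) - S xs (((j:Int) + 1 - mA k (j+1)).toNat) := by
      rw [hgj, hgl, hSj, ht, hSl]; ring
    simp only [stepA, if_pos hck]
    refine Prod.ext (by simp; omega) (Prod.ext ?_ ?_)
    · simpa using hcur
    · simp only
      by_cases hsk : mA k (j+1) = k
      · rw [if_pos (show (j:Int) - ((j:Int) - mA k j + 1) + 1 = k by omega), if_pos hsk]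
        rw [hcur, show ((j:Int) + 1 - k) = ((j:Int) + 1 - mA k (j+1)) by rw [hsk]]
        simp [sc]
      · rw [if_neg (show ¬((j:Int) - ((j:Int) - mA k j + 1) + 1 = k) by omega), if_neg hsk]
  · -- no-shrink branch
    have hb : mA k (j+1) = mA k j + 1 := by unfold mA at *; push_cast at *; omega
    have ht : (((j:Int) + 1 - mA k (j+1)).toNat) = (((j:Int) - mA k j).toNat) := by
      rw [hb]; omega
    have hcur : S xs j - S xs (((j:Int) - mA k j).toNat) + PySem.List.pyGetD xs (j:Int) 0 =
        S xs (j+1) - S xs (((j:Int) + 1 - mA k (j+1)).toNat) := by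
      rw [hgj, hSj, ht]; ring
    simp only [stepA, if_neg hck]
    refine Prod.ext (by simp; omega) (Prod.ext ?_ ?_)
    · simpa using hcur
    · simp only
      by_cases hsk : mA k (j+1) = k
      · rw [if_pos (show (j:Int) - ((j:Int) - mA k j) + 1 = k by omega), if_pos hsk]
        rw [hcur, show ((j:Int) + 1 - k) = ((j:Int) + 1 - mA k (j+1)) by rw [hsk]]
        simp [sc]
      · rw [if_neg (show ¬((j:Int) - ((j:Int) - mA k j) + 1 = k) by omega), if_neg hsk]

theorem A_state (xs : List Int) (k lower upper : Int) (j : Nat) (hj : j ≤ xs.length) :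
    (PySem.List.pyRange 0 (j:Int) 1).foldl (stepA xs k lower upper) (0, 0, 0) =
      ((j:Int) - mA k j,
       S xs j - S xs (((j:Int) - mA k j).toNat),
       PA xs k lower upper j) := by
  induction j with
  | zero => simp [PySem.List.pyRange_one_eq_nil, mA, S, PA]
  | succ j ih =>
    have hj' : j ≤ xs.length := Nat.le_of_succ_le hj
    have hjl : j < xs.length := hj
    rw [show (((j+1:Nat)):Int) = (j:Int) + 1 by push_cast; ring,
       PySem.List.pyRange_one_succ_right (by exact_mod_cast Nat.zero_le j),
       List.foldl_append, ih hj']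
    simp only [List.foldl_cons, List.foldl_nil]
    rw [stepA_closed xs k lower upper j _ hjl]
    simp only [PA]

-- A's result is PA at the full length
theorem A_eq_PA (xs : List Int) (k lower upper : Int) :
    diet_plan xs k lower upper = PA xs k lower upper xs.length := by
  show ((PySem.List.pyRange 0 ((xs.length : Nat) : Int) 1).foldl
    (stepA xs k lower upper) (0, 0, 0)).2.2 = _
  rw [A_state xs k lower upper xs.length le_rfl]

-- the prefix list B builds is the map of S over 0..n
theorem prefix_eq (xs : List Int) :
    pyPrefix xs = (List.range (xs.length + 1)).map (S xs) := by
  induction xs using List.reverseRecOn with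
  | nil => simp [pyPrefix, S]
  | append_singleton ys x ih =>
    rw [pyPrefix, List.foldl_append]
    rw [show ys.foldl (fun acc c => acc ++ [PySem.List.pyGetD acc (-1) 0 + c]) [(0:Int)]
        = pyPrefix ys from rfl, ih]
    simp only [List.foldl_cons, List.foldl_nil]
    have hlast : PySem.List.pyGetD ((List.range (ys.length + 1)).map (S ys)) (-1) 0 =
        S ys ys.length := by
      rw [List.range_succ, List.map_append]
      simp [PySem.List.pyGetD_neg_one_append_singleton]
    rw [hlast, show ((ys ++ [x]).length + 1) = (ys.length + 1) + 1 by simp,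
       List.range_succ (n := ys.length + 1), List.map_append]
    congr 1
    · apply List.map_congr_left
      intro t ht
      simp only [List.mem_range] at ht
      rw [S, S, List.take_append_of_le_length (by omega)]
    · simp only [List.map_cons, List.map_nil, List.cons.injEq, and_true]
      rw [S, S, List.take_of_length_le (by omega), List.take_of_length_le (by simp)]
      simp

theorem pre_getD (xs : List Int) (t : Int) (h0 : 0 ≤ t) (h1 : t ≤ (xs.length : Int)) :
    PySem.List.pyGetD (pyPrefix xs) t 0 = S xs t.toNat := by
  rw [prefix_eq, pyGetD_toNat _ _ h0 (by simp; omega)]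
  rw [List.getD_eq_getElem _ _ (by simp; omega)]
  simp

-- for k ≥ 1 the PA counter is B's prefix-difference fold
theorem PA_eq_fold (xs : List Int) (k lower upper : Int) (hk : 1 ≤ k) (j : Nat) :
    PA xs k lower upper j =
      (PySem.List.pyRange 0 ((j:Int) - k + 1) 1).foldl
        (fun p i => sc lower upper p (S xs ((i + k).toNat) - S xs i.toNat)) 0 := by
  induction j with
  | zero =>
    rw [PySem.List.pyRange_one_eq_nil (by push_cast; omega)]
    rfl
  | succ j ih =>
    by_cases hjk : (j:Int) + 1 < k
    · rw [show PA xs k lower upper (j+1) = PA xs k lower upper j by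
        simp only [PA]; rw [if_neg (show ¬ mA k (j+1) = k by unfold mA; push_cast; omega)]]
      rw [ih, PySem.List.pyRange_one_eq_nil (by omega : (j:Int) - k + 1 ≤ 0),
        PySem.List.pyRange_one_eq_nil (by push_cast; omega : ((j+1:Nat):Int) - k + 1 ≤ 0)]
    · rw [show (((j+1:Nat)):Int) - k + 1 = ((j:Int) - k + 1) + 1 by push_cast; ring,
         PySem.List.pyRange_one_succ_right (by omega), List.foldl_append, ← ih]
      simp only [List.foldl_cons, List.foldl_nil]
      rw [show PA xs k lower upper (j+1) =
          sc lower upper (PA xs k lower upper j)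
            (S xs (j+1) - S xs (((j:Int) + 1 - k).toNat)) by
        simp only [PA]; rw [if_pos (show mA k (j+1) = k by unfold mA; push_cast; omega)]]
      congr 1
      · congr 1 <;> congr 1 <;> omega

theorem B_unfolded (xs : List Int) (k lower upper : Int) (hk : 1 ≤ k) :
    diet_plan_alt xs k lower upper =
      (PySem.List.pyRange 0 ((xs.length : Int) - k + 1) 1).foldl
        (fun p i => sc lower upper p (S xs ((i + k).toNat) - S xs i.toNat)) 0 := by
  unfold diet_plan_alt
  rw [if_neg (by omega)]
  apply PySem.List.foldl_congr_mem
  intro p i hi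
  rw [PySem.List.mem_pyRange_one] at hi
  simp only
  rw [pre_getD xs (i + k) (by omega) (by omega), pre_getD xs i (by omega) (by omega)]
  simp [sc]

theorem B_zero (xs : List Int) (k lower upper : Int) (hk : k ≤ 0) :
    diet_plan_alt xs k lower upper = 0 := by
  unfold diet_plan_alt
  rw [if_pos hk]

theorem PA_k_zero (xs : List Int) (lower upper : Int) (j : Nat) :
    PA xs 0 lower upper j =
      (j:Int) * (if (0:Int) < lower then -1 else if (0:Int) > upper then 1 else 0) := by
  induction j with
  | zero => simp [PA]
  | succ j ih =>
    have h1 : mA 0 (j+1) = 0 := by unfold mA; omega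
    simp only [PA, h1, ih]
    have h2 : S xs (j+1) - S xs (((j:Int) + 1 - 0).toNat) = 0 := by
      rw [show (((j:Int) + 1 - 0).toNat) = j + 1 by omega]; ring
    rw [h2]
    simp only [sc]
    push_cast
    split_ifs <;> ring

theorem PA_k_neg (xs : List Int) (k lower upper : Int) (hk : k < 0) (j : Nat) :
    PA xs k lower upper j = 0 := by
  induction j with
  | zero => rfl
  | succ j ih =>
    have h1 : ¬ mA k (j+1) = k := by unfold mA; push_cast; omega
    simp only [PA, if_neg h1, ih]

-- ===== VERDICT (by name: the statement is the Claim_ definition above) =====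
theorem diet_plan_spec : Claim_unchanged_diet_plan := by
  intro calories k lower upper _
  unfold Spec_diet_plan
  intro hnd
  rw [A_eq_PA]
  rcases lt_trichotomy k 0 with hk | hk | hk
  · rw [PA_k_neg _ _ _ _ hk]
    unfold diet_plan_alt
    rw [if_pos (by omega)]
  · subst hk
    rw [PA_k_zero, B_zero _ _ _ _ le_rfl]
    unfold D_diet_plan at hnd
    push Not at hnd
    rcases eq_or_ne calories ([] : List Int) with hnil | hnil
    · simp [hnil]
    · rcases hnd rfl hnil with ⟨h1, h2⟩
      rw [if_neg (show ¬ (0:Int) < lower by omega),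
        if_neg (show ¬ (0:Int) > upper by omega), mul_zero]
  · rw [B_unfolded _ _ _ _ (by omega), PA_eq_fold _ _ _ _ (by omega)]

theorem diet_plan_changed : Claim_changed_diet_plan := by
  unfold Claim_changed_diet_plan; decide

theorem diet_plan_tight : Claim_exact_diet_plan := by
  intro calories k lower upper _ hd
  obtain ⟨hk, hnil, hlu⟩ := hd
  subst hk
  rw [A_eq_PA, PA_k_zero, B_zero _ _ _ _ le_rfl]
  have hn : 0 < calories.length := List.length_pos_iff.mpr hnil
  rcases lt_or_ge 0 lower with h | h
  · rw [if_pos h]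
    intro hc
    omega
  · have hu : upper < 0 := hlu.resolve_left (by omega)
    rw [if_neg (show ¬ (0:Int) < lower by omega),
      if_pos (show (0:Int) > upper by omega)]
    intro hc
    omega
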